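-- pv_equiv track=rewrite | github.com/snunez1/temus | mcp/parquet_data_reader.py | _generate_search_recommendations
-- ===== SOURCE A (Python) =====
-- from typing import Dict, Any, List, Optional, Union
--
-- def _generate_search_recommendations(search_results: Dict[str, Any],
--                                    query_terms: List[str]) -> List[str]:
--     """Generate analysis recommendations based on search results."""
--     recommendations = []
--
--     # Analyze search patterns and suggest next steps
--     if any('power' in str(results) for results in search_results.values()):
--         recommendations.append("Consider analyzing power curve characteristics using analyze_power_curves()")
--
--     if any('forecast' in str(results) or 'rmse' in str(results) for results in search_results.values()):
--         recommendations.append("Evaluate forecast performance using evaluate_forecast_performance()")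
--
--     if any('temporal' in str(results) or 'time' in str(results) for results in search_results.values()):
--         recommendations.append("Assess temporal patterns using assess_temporal_patterns()")
--
--     if any('business' in str(results) or 'co2' in str(results) for results in search_results.values()):
--         recommendations.append("Calculate business impact using calculate_business_impact()")
--
--     return recommendations
-- ===== SOURCE B (Python) =====
-- def _generate_search_recommendations(search_results, query_terms):
--     has_power = has_forecast = has_temporal = has_business = False
--     for results in search_results.values():
--         s = str(results)
--         has_power = has_power or 'power' in s
--         has_forecast = has_forecast or 'forecast' in s or 'rmse' in s
--         has_temporal = has_temporal or 'temporal' in s or 'time' in s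
--         has_business = has_business or 'business' in s or 'co2' in s
--     recommendations = []
--     if has_power:
--         recommendations.append("Consider analyzing power curve characteristics using analyze_power_curves()")
--     if has_forecast:
--         recommendations.append("Evaluate forecast performance using evaluate_forecast_performance()")
--     if has_temporal:
--         recommendations.append("Assess temporal patterns using assess_temporal_patterns()")
--     if has_business:
--         recommendations.append("Calculate business impact using calculate_business_impact()")
--     return recommendations
-- ===== Notes on version B (the rewrite author's own statement) =====
-- stated objective: alternative
-- what changed: Replaces A's four independent any(...) scans over search_results.values() with a single pass that computes str(results) once per value and accumulates four boolean flags, building the recommendation list afterwards from the flags.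
import Mathlib
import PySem

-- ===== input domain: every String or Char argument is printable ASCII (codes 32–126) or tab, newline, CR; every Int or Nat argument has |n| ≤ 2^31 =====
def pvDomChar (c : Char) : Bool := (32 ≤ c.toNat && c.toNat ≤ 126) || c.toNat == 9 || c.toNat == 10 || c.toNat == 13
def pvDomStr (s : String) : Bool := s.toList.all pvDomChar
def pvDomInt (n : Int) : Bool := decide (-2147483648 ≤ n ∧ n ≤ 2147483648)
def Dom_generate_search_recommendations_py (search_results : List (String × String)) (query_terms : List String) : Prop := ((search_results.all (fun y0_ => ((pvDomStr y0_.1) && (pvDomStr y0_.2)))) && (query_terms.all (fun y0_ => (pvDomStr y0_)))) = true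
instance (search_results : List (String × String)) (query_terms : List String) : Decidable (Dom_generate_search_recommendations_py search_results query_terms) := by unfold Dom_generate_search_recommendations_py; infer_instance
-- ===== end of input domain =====

-- B makes one pass over the values, computing the string once and OR-ing four flags,
-- instead of A's four independent any(...) scans; same return value, alternative decomposition.


-- ===== PORT A =====
-- faithful transliteration of A: four `any` passes over the dict's values
-- (values are strings, so str(results) is the value itself)
def generate_search_recommendations_py (search_results : List (String × String)) (query_terms : List String) : List String :=
  let vals := search_results.map Prod.snd
  let recommendations : List String := []
  let recommendations := if vals.any (fun r => PySem.Str.isIn "power" r) then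
      recommendations ++ ["Consider analyzing power curve characteristics using analyze_power_curves()"]
    else recommendations
  let recommendations := if vals.any (fun r => PySem.Str.isIn "forecast" r || PySem.Str.isIn "rmse" r) then
      recommendations ++ ["Evaluate forecast performance using evaluate_forecast_performance()"]
    else recommendations
  let recommendations := if vals.any (fun r => PySem.Str.isIn "temporal" r || PySem.Str.isIn "time" r) then
      recommendations ++ ["Assess temporal patterns using assess_temporal_patterns()"]
    else recommendations
  let recommendations := if vals.any (fun r => PySem.Str.isIn "business" r || PySem.Str.isIn "co2" r) then
      recommendations ++ ["Calculate business impact using calculate_business_impact()"]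
    else recommendations
  recommendations

-- ===== PORT B =====
-- transliteration of Source B: one fold accumulating four boolean flags, then build the list
def generate_search_recommendations_py_alt (search_results : List (String × String)) (query_terms : List String) : List String :=
  let flags := search_results.foldl
    (fun (st : Bool × Bool × Bool × Bool) kv =>
      let s := kv.2
      ( st.1 || PySem.Str.isIn "power" s,
        st.2.1 || PySem.Str.isIn "forecast" s || PySem.Str.isIn "rmse" s,
        st.2.2.1 || PySem.Str.isIn "temporal" s || PySem.Str.isIn "time" s,
        st.2.2.2 || PySem.Str.isIn "business" s || PySem.Str.isIn "co2" s ))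
    (false, false, false, false)
  (if flags.1 then ["Consider analyzing power curve characteristics using analyze_power_curves()"] else [])
  ++ (if flags.2.1 then ["Evaluate forecast performance using evaluate_forecast_performance()"] else [])
  ++ (if flags.2.2.1 then ["Assess temporal patterns using assess_temporal_patterns()"] else [])
  ++ (if flags.2.2.2 then ["Calculate business impact using calculate_business_impact()"] else [])

-- ===== PRECONDITION & SPEC =====
def Spec_generate_search_recommendations_py (search_results : List (String × String)) (query_terms : List String) (out : List String) : Prop := out = generate_search_recommendations_py_alt search_results query_terms
instance (search_results : List (String × String)) (query_terms : List String) (out : List String) : Decidable (Spec_generate_search_recommendations_py search_results query_terms out) := by unfold Spec_generate_search_recommendations_py; infer_instance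

-- ===== CLAIM (what is proved, stated in full; the proofs are below) =====
def Claim_equal_generate_search_recommendations_py : Prop := ∀ (search_results : List (String × String)) (query_terms : List String), Dom_generate_search_recommendations_py search_results query_terms → Spec_generate_search_recommendations_py search_results query_terms (generate_search_recommendations_py search_results query_terms)

-- ===== LEMMAS AND PROOFS =====

-- the four-flag fold computes the four `any`s, OR-ed onto the accumulator
theorem flags_fold_eq (xs : List (String × String)) (a b c d : Bool) :
    xs.foldl (fun (st : Bool × Bool × Bool × Bool) kv =>
      ( st.1 || PySem.Str.isIn "power" kv.2,
        st.2.1 || PySem.Str.isIn "forecast" kv.2 || PySem.Str.isIn "rmse" kv.2,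
        st.2.2.1 || PySem.Str.isIn "temporal" kv.2 || PySem.Str.isIn "time" kv.2,
        st.2.2.2 || PySem.Str.isIn "business" kv.2 || PySem.Str.isIn "co2" kv.2 ))
      (a, b, c, d)
    = (a || xs.any (fun kv => PySem.Str.isIn "power" kv.2),
       b || xs.any (fun kv => PySem.Str.isIn "forecast" kv.2 || PySem.Str.isIn "rmse" kv.2),
       c || xs.any (fun kv => PySem.Str.isIn "temporal" kv.2 || PySem.Str.isIn "time" kv.2),
       d || xs.any (fun kv => PySem.Str.isIn "business" kv.2 || PySem.Str.isIn "co2" kv.2)) := by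
  induction xs generalizing a b c d with
  | nil => simp
  | cons x t ih => rw [List.foldl_cons, ih]; simp [List.any_cons, Bool.or_assoc]

-- ===== VERDICT (by name: the statement is the Claim_ definition above) =====
theorem generate_search_recommendations_py_spec : Claim_equal_generate_search_recommendations_py := by
  intro sr qt _
  simp only [Spec_generate_search_recommendations_py, generate_search_recommendations_py,
    generate_search_recommendations_py_alt]
  rw [flags_fold_eq sr]
  simp only [Bool.false_or, List.any_map, Function.comp_def]
  generalize (sr.any fun kv => PySem.Str.isIn "power" kv.2) = c1
  generalize (sr.any fun kv => PySem.Str.isIn "forecast" kv.2 || PySem.Str.isIn "rmse" kv.2) = c2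
  generalize (sr.any fun kv => PySem.Str.isIn "temporal" kv.2 || PySem.Str.isIn "time" kv.2) = c3
  generalize (sr.any fun kv => PySem.Str.isIn "business" kv.2 || PySem.Str.isIn "co2" kv.2) = c4
  cases c1 <;> cases c2 <;> cases c3 <;> cases c4 <;> rfl
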